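-- pv_equiv track=rewrite | github.com/adityachhajer/LeetCodeSolutions | DistributeCandiestoPeople.py | distributeCandies
-- ===== SOURCE A (Python) =====
-- from typing import List
--
-- def distributeCandies(candies: int, num_people: int) -> List[int]:
--     ans=[0 for _ in range(num_people)]
--     i=1
--     j=0
--     data=0
--     tot=candies
--     while candies>0:
--         ans[j]+=i
--         candies-=i
--         i+=1
--         j+=1
--         if j==num_people:
--             j=0
--         data=data+i
--         if data>=tot:
--             i=candies
--     return ans
-- ===== SOURCE B (Python) =====
-- from typing import List
--
-- def distributeCandies(candies: int, num_people: int) -> List[int]: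
--     if candies <= 0:
--         return [0 for _ in range(num_people)]
--     # k = number of full gives: largest k with k*(k+1)//2 <= candies (binary search)
--     lo = 0
--     hi = candies
--     while lo < hi:
--         mid = (lo + hi + 1) // 2
--         if mid * (mid + 1) // 2 <= candies:
--             lo = mid
--         else:
--             hi = mid - 1
--     k = lo
--     rem = candies - k * (k + 1) // 2
--     ans = []
--     for p in range(num_people):
--         q = (k - p - 1) // num_people + 1 if p < k else 0
--         ans.append(q * (p + 1) + num_people * (q * (q - 1) // 2))
--     ans[k % num_people] += rem
--     return ans
-- ===== Notes on version B (the rewrite author's own statement) =====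
-- stated objective: alternative
-- what changed: Replaces A's per-give simulation loop (one iteration per candy handout) by a closed form: binary-search the number k of full gives, compute each person's total by an arithmetic-series formula, and add the remainder to person k % num_people.
import Mathlib
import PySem

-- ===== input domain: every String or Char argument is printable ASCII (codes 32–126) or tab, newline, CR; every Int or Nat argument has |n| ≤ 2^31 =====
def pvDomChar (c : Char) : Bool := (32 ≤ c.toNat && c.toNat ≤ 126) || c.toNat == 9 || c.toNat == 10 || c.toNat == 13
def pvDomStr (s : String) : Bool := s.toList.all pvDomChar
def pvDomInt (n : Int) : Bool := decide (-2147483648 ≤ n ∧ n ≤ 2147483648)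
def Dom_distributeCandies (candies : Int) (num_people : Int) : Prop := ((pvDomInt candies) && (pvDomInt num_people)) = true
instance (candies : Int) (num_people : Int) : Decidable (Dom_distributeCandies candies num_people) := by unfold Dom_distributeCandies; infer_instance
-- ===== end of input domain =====

-- B replaces A's per-give loop by a closed form: binary search for the give count plus a per-person arithmetic-series formula.

-- ===== PORT A =====
-- the while-loop of A; fuel = candies.toNat + 1 bounds the iteration count (candies strictly decreases while positive)
def pvALoop (fuel : Nat) (ans : List Int) (candies i j data tot n : Int) : List Int :=
  match fuel with
  | 0 => ans
  | fuel + 1 =>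
    if 0 < candies then
      let ans' := PySem.List.pySetD ans j (PySem.List.pyGetD ans j 0 + i)   -- ans[j] += i
      let candies' := candies - i
      let i' := i + 1
      let j0 := j + 1
      let j' := if j0 = n then 0 else j0
      let data' := data + i'
      let i'' := if data' ≥ tot then candies' else i'
      pvALoop fuel ans' candies' i'' j' data' tot n
    else ans

def distributeCandies (candies : Int) (num_people : Int) : List Int :=
  let ans := (PySem.List.pyRange 0 num_people 1).map (fun _ => (0 : Int))
  pvALoop (candies.toNat + 1) ans candies 1 0 0 candies num_people

-- ===== PORT B =====
-- the binary-search loop of B; fuel = (hi-lo).toNat + 1 bounds the iteration count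
def pvBSearch (fuel : Nat) (candies lo hi : Int) : Int :=
  match fuel with
  | 0 => lo
  | fuel + 1 =>
    if lo < hi then
      let mid := PySem.Int.floordiv (lo + hi + 1) 2
      if PySem.Int.floordiv (mid * (mid + 1)) 2 ≤ candies then pvBSearch fuel candies mid hi
      else pvBSearch fuel candies lo (mid - 1)
    else lo

def distributeCandies_alt (candies : Int) (num_people : Int) : List Int :=
  if candies ≤ 0 then (PySem.List.pyRange 0 num_people 1).map (fun _ => (0 : Int))
  else
    let k := pvBSearch (candies.toNat + 1) candies 0 candies
    let rem := candies - PySem.Int.floordiv (k * (k + 1)) 2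
    let ans := (PySem.List.pyRange 0 num_people 1).map (fun p =>
      let q : Int := if p < k then PySem.Int.floordiv (k - p - 1) num_people + 1 else 0
      q * (p + 1) + num_people * (PySem.Int.floordiv (q * (q - 1)) 2))
    let idx := PySem.Int.mod k num_people
    PySem.List.pySetD ans idx (PySem.List.pyGetD ans idx 0 + rem)   -- ans[k % num_people] += rem

-- ===== PRECONDITION & SPEC =====
-- Pre_ excludes candies > 0 with num_people ≤ 0, where A raises IndexError (ans[0] on an empty list).
def Pre_distributeCandies (candies : Int) (num_people : Int) : Prop := candies ≤ 0 ∨ 0 < num_people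
instance (candies : Int) (num_people : Int) : Decidable (Pre_distributeCandies candies num_people) := by
  unfold Pre_distributeCandies; infer_instance

def pvWitness_distributeCandies : Int × Int := (10, 3)

def Spec_distributeCandies (candies : Int) (num_people : Int) (out : List Int) : Prop := out = distributeCandies_alt candies num_people
instance (candies : Int) (num_people : Int) (out : List Int) : Decidable (Spec_distributeCandies candies num_people out) := by unfold Spec_distributeCandies; infer_instance

-- ===== CLAIM (what is proved, stated in full; the proofs are below) =====
def Claim_equal_distributeCandies : Prop := ∀ (candies : Int) (num_people : Int), Dom_distributeCandies candies num_people → Pre_distributeCandies candies num_people → Spec_distributeCandies candies num_people (distributeCandies candies num_people)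

-- ===== LEMMAS AND PROOFS =====

-- Nat-world model of the distribution -------------------------------------

/-- triangular number n*(n+1)/2 -/
def pvTri (n : Nat) : Nat := n * (n + 1) / 2

theorem pvTri_succ (n : Nat) : pvTri (n + 1) = pvTri n + (n + 1) := by
  unfold pvTri
  have h : (n + 1) * (n + 1 + 1) = n * (n + 1) + 2 * (n + 1) := by ring
  omega

theorem pvTri_mono : ∀ {a b : Nat}, a ≤ b → pvTri a ≤ pvTri b := by
  intro a b h
  unfold pvTri
  exact Nat.div_le_div_right (Nat.mul_le_mul h (by omega))

/-- the sequence of amounts handed out: next give is t+1, capped by the remaining c -/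
def pvGives (c t : Nat) : List Nat :=
  if h : c = 0 then [] else min (t + 1) c :: pvGives (c - min (t + 1) c) (t + 1)
termination_by c
decreasing_by omega

/-- number of FULL gives starting from next give t+1 with c remaining -/
def pvK (c t : Nat) : Nat :=
  if h : t + 1 ≤ c then pvK (c - (t + 1)) (t + 1) + 1 else 0
termination_by c
decreasing_by omega

/-- sum of q full gives starting at t+1 -/
def pvSumTo (t q : Nat) : Nat := q * t + pvTri q

/-- distributing a list of gives round-robin starting at position j (mirrors both loops' update) -/
def pvApply (n : Int) (ans : List Int) (j : Int) : List Nat → List Int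
  | [] => ans
  | g :: gs =>
    let ans' := PySem.List.pySetD ans j (PySem.List.pyGetD ans j 0 + (g : Int))
    let j0 := j + 1
    pvApply n ans' (if j0 = n then 0 else j0) gs

-- A-side simulation ---------------------------------------------------------

theorem pvALoop_sim (C : Nat) : ∀ (r : Nat), ∀ (m fuel : Nat) (ans : List Int) (j n : Int),
    r = C - pvTri m → pvTri m < C → pvTri (m + 1) ≤ C → r + 1 ≤ fuel →
    pvALoop fuel ans (r : Int) ((m : Int) + 1) j ((pvTri (m + 1) : Int) - 1) (C : Int) n
      = pvApply n ans j (pvGives r m) := by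
  intro r
  induction r using Nat.strong_induction_on with
  | _ r ih =>
    intro m fuel ans j n hr hm hm1 hfuel
    have hts := pvTri_succ m
    have hts2 := pvTri_succ (m + 1)
    have hrpos : 0 < r := by omega
    have hmr : m + 1 ≤ r := by omega
    obtain ⟨f, rfl⟩ : ∃ f, fuel = f + 1 := ⟨fuel - 1, by omega⟩
    simp only [pvALoop]
    rw [if_pos (by exact_mod_cast hrpos : (0 : Int) < (r : Int))]
    rw [pvGives, dif_neg (by omega : ¬ r = 0), Nat.min_eq_left hmr]
    simp only [pvApply]
    set r' := r - (m + 1) with hr'def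
    have hcand : (r : Int) - ((m : Int) + 1) = ((r' : Nat) : Int) := by omega
    have hdata : ((pvTri (m + 1) : Nat) : Int) - 1 + ((m : Int) + 1 + 1)
        = ((pvTri (m + 1 + 1) : Nat) : Int) - 1 := by omega
    have hgive : ((m : Int) + 1) = (((m + 1 : Nat)) : Int) := by push_cast; ring
    rw [hcand, hdata, hgive]
    by_cases hz : r' = 0
    · -- last give was the final one: loop exits next iteration
      rw [hz]
      rw [pvGives, dif_pos rfl]
      obtain ⟨f1, rfl⟩ : ∃ f1, f = f1 + 1 := ⟨f - 1, by omega⟩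
      simp only [pvALoop, pvApply]
      rw [if_neg (by norm_num : ¬ (0 : Int) < ((0 : Nat) : Int))]
    · by_cases hfire : pvTri (m + 1 + 1) ≤ C
      · -- the if data >= tot does not fire: continue in the full phase
        rw [if_neg (by omega : ¬ ((pvTri (m + 1 + 1) : Nat) : Int) - 1 ≥ ((C : Nat) : Int))]
        have hih := ih r' (by omega) (m + 1) f
          (PySem.List.pySetD ans j (PySem.List.pyGetD ans j 0 + ((m + 1 : Nat) : Int)))
          (if j + 1 = n then 0 else j + 1) n (by omega) (by omega) hfire (by omega)
        push_cast at hih ⊢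
        exact hih
      · -- fired: i becomes the remaining candies; one more give then exit
        rw [if_pos (by omega : ((pvTri (m + 1 + 1) : Nat) : Int) - 1 ≥ ((C : Nat) : Int))]
        have hlt : r' < m + 1 + 1 := by omega
        rw [pvGives, dif_neg hz, Nat.min_eq_right (by omega)]
        have hz2 : r' - r' = 0 := by omega
        rw [hz2, pvGives, dif_pos rfl]
        obtain ⟨f1, rfl⟩ : ∃ f1, f = f1 + 1 := ⟨f - 1, by omega⟩
        simp only [pvALoop, pvApply]
        rw [if_pos (by exact_mod_cast Nat.pos_of_ne_zero hz : (0 : Int) < ((r' : Nat) : Int))]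
        have hzz : ((r' : Nat) : Int) - ((r' : Nat) : Int) = 0 := by ring
        rw [hzz]
        obtain ⟨f2, rfl⟩ : ∃ f2, f1 = f2 + 1 := ⟨f1 - 1, by omega⟩
        simp only [pvALoop]
        rw [if_neg (by norm_num : ¬ (0 : Int) < (0 : Int))]

-- gives structure ------------------------------------------------------------

theorem pvSumTo_succ (t q : Nat) : pvSumTo t (q + 1) = (t + 1) + pvSumTo (t + 1) q := by
  unfold pvSumTo; rw [pvTri_succ]; ring

theorem pvSumTo_zero (t : Nat) : pvSumTo t 0 = 0 := by simp [pvSumTo, pvTri]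

theorem pvSumTo_one (t : Nat) : pvSumTo t 1 = t + 1 := by simp [pvSumTo, pvTri]

theorem pvK_bracket : ∀ c t : Nat, pvSumTo t (pvK c t) ≤ c ∧ c < pvSumTo t (pvK c t + 1) := by
  intro c
  induction c using Nat.strong_induction_on with
  | _ c ih =>
    intro t
    rw [pvK]
    split
    · rename_i h
      have hih := ih (c - (t + 1)) (by omega) (t + 1)
      rw [pvSumTo_succ t (pvK (c - (t + 1)) (t + 1)), pvSumTo_succ t (pvK (c - (t + 1)) (t + 1) + 1)]
      omega
    · rename_i h
      simp only [Nat.zero_add, pvSumTo_zero, pvSumTo_one]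
      omega

theorem pvGives_eq : ∀ c t : Nat, 0 < c →
    pvGives c t = (List.range (pvK c t)).map (fun s => t + 1 + s)
      ++ (if c = pvSumTo t (pvK c t) then [] else [c - pvSumTo t (pvK c t)]) := by
  intro c
  induction c using Nat.strong_induction_on with
  | _ c ih =>
    intro t hc
    rw [pvGives, pvK]
    rw [dif_neg (by omega : ¬ c = 0)]
    by_cases h : t + 1 ≤ c
    · rw [dif_pos h, Nat.min_eq_left h]
      by_cases h0 : c - (t + 1) = 0
      · have hk0 : pvK (c - (t + 1)) (t + 1) = 0 := by rw [pvK]; simp [h0]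
        rw [hk0]
        have hc' : c = t + 1 := by omega
        simp [pvGives, pvSumTo_one, hc']
      · have hih := ih (c - (t + 1)) (by omega) (t + 1) (by omega)
        have hf : ((fun s => t + 1 + s) ∘ Nat.succ) = (fun s : Nat => t + 1 + 1 + s) := by
          funext s; simp only [Function.comp_apply]; omega
        have hrange : (List.range (pvK (c - (t + 1)) (t + 1) + 1)).map (fun s => t + 1 + s)
            = (t + 1) :: (List.range (pvK (c - (t + 1)) (t + 1))).map (fun s => t + 1 + 1 + s) := by
          rw [List.range_succ_eq_map, List.map_cons, List.map_map, hf]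
        rw [hih, hrange]
        simp only [List.cons_append]
        congr 1
        have hsum := pvSumTo_succ t (pvK (c - (t + 1)) (t + 1))
        have hcond : (c = pvSumTo t (pvK (c - (t + 1)) (t + 1) + 1))
            ↔ (c - (t + 1) = pvSumTo (t + 1) (pvK (c - (t + 1)) (t + 1))) := by omega
        by_cases hz : c - (t + 1) = pvSumTo (t + 1) (pvK (c - (t + 1)) (t + 1))
        · rw [if_pos hz, if_pos (hcond.mpr hz)]
        · rw [if_neg hz, if_neg (fun hx => hz (hcond.mp hx))]
          have hval : c - (t + 1) - pvSumTo (t + 1) (pvK (c - (t + 1)) (t + 1))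
              = c - pvSumTo t (pvK (c - (t + 1)) (t + 1) + 1) := by omega
          rw [hval]
    · rw [dif_neg h, Nat.min_eq_right (by omega)]
      have h2 : c - c = 0 := by omega
      rw [h2, pvGives]
      simp [pvSumTo_zero, Nat.ne_of_gt hc]

theorem pvSumTo_zero_left (q : Nat) : pvSumTo 0 q = pvTri q := by simp [pvSumTo]

theorem pvK_unique (c k : Nat) (h1 : pvTri k ≤ c) (h2 : c < pvTri (k + 1)) : k = pvK c 0 := by
  have hb := pvK_bracket c 0
  rw [pvSumTo_zero_left, pvSumTo_zero_left] at hb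
  rcases Nat.lt_trichotomy k (pvK c 0) with h | h | h
  · have := pvTri_mono (show k + 1 ≤ pvK c 0 by omega)
    omega
  · exact h
  · have := pvTri_mono (show pvK c 0 + 1 ≤ k by omega)
    omega

-- binary search ---------------------------------------------------------------

theorem pvBSearch_correct : ∀ (fuel : Nat) (c lo hi : Int), (hi - lo).toNat < fuel →
    0 ≤ lo → lo ≤ hi →
    PySem.Int.floordiv (lo * (lo + 1)) 2 ≤ c → c < PySem.Int.floordiv ((hi + 1) * (hi + 2)) 2 →
    0 ≤ pvBSearch fuel c lo hi ∧
    PySem.Int.floordiv (pvBSearch fuel c lo hi * (pvBSearch fuel c lo hi + 1)) 2 ≤ c ∧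
    c < PySem.Int.floordiv ((pvBSearch fuel c lo hi + 1) * (pvBSearch fuel c lo hi + 2)) 2 := by
  intro fuel
  induction fuel with
  | zero => intro c lo hi hf; omega
  | succ fuel ih =>
    intro c lo hi hf h0 hlh hlo hhi
    simp only [pvBSearch]
    split
    · rename_i hlt
      have hm1 : lo + 1 ≤ PySem.Int.floordiv (lo + hi + 1) 2 := by
        rw [PySem.Int.le_floordiv_iff_mul_le (by norm_num)]
        omega
      have hm2 : PySem.Int.floordiv (lo + hi + 1) 2 < hi + 1 := by
        rw [PySem.Int.floordiv_lt_iff_lt_mul (by norm_num)]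
        omega
      split
      · rename_i hcond
        exact ih c _ hi (by omega) (by omega) (by omega) hcond hhi
      · rename_i hcond
        rw [Int.not_le] at hcond
        have hrw : PySem.Int.floordiv (lo + hi + 1) 2 - 1 + 1 = PySem.Int.floordiv (lo + hi + 1) 2 := by ring
        have hrw2 : PySem.Int.floordiv (lo + hi + 1) 2 - 1 + 2 = PySem.Int.floordiv (lo + hi + 1) 2 + 1 := by ring
        refine ih c lo _ (by omega) h0 (by omega) hlo ?_
        rw [hrw, hrw2]
        calc c < PySem.Int.floordiv (PySem.Int.floordiv (lo + hi + 1) 2 * (PySem.Int.floordiv (lo + hi + 1) 2 + 1)) 2 := hcond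
          _ = _ := by ring_nf
    · rename_i hge
      have : lo = hi := by omega
      subst this
      exact ⟨h0, hlo, hhi⟩

theorem pvTriInt (a : Nat) : PySem.Int.floordiv ((a : Int) * ((a : Int) + 1)) 2 = (pvTri a : Int) := by
  have h : ((a : Int)) * ((a : Int) + 1) = ((a * (a + 1) : Nat) : Int) := by push_cast; ring
  rw [h]
  exact_mod_cast PySem.Int.floordiv_natCast (a * (a + 1)) 2

theorem pvBSearch_eq (c : Int) (hc : 0 < c) :
    pvBSearch (c.toNat + 1) c 0 c = (pvK c.toNat 0 : Int) := by
  have ht0 : PySem.Int.floordiv ((0 : Int) * ((0 : Int) + 1)) 2 = 0 := by decide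
  have hini : c < PySem.Int.floordiv ((c + 1) * (c + 2)) 2 := by
    have h1 : c + 1 = ((c.toNat + 1 : Nat) : Int) := by omega
    have h2 : c + 2 = ((c.toNat + 1 : Nat) : Int) + 1 := by omega
    rw [h1, h2, pvTriInt (c.toNat + 1)]
    have h3 := pvTri_succ c.toNat
    omega
  obtain ⟨hr0, hr1, hr2⟩ := pvBSearch_correct (c.toNat + 1) c 0 c (by omega) le_rfl (by omega)
    (by rw [ht0]; omega) hini
  set r := pvBSearch (c.toNat + 1) c 0 c with hrdef
  have hrn : r = ((r.toNat : Nat) : Int) := by omega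
  rw [hrn] at hr1 hr2
  rw [pvTriInt r.toNat] at hr1
  have hrr : ((r.toNat : Nat) : Int) + 1 = ((r.toNat + 1 : Nat) : Int) := by push_cast; ring
  have hrr2 : ((r.toNat : Nat) : Int) + 2 = ((r.toNat + 1 : Nat) : Int) + 1 := by push_cast; ring
  rw [hrr, hrr2, pvTriInt (r.toNat + 1)] at hr2
  have h1 : pvTri r.toNat ≤ c.toNat := by omega
  have h2 : c.toNat < pvTri (r.toNat + 1) := by omega
  rw [hrn, pvK_unique c.toNat r.toNat h1 h2]

-- per-person closed form --------------------------------------------------------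

/-- B's per-person give count, Nat version -/
def pvQ (N k p : Nat) : Nat := if p < k then (k - p - 1) / N + 1 else 0

/-- B's per-person formula, Nat version -/
def pvCf (N k p : Nat) : Nat := pvQ N k p * (p + 1) + N * (pvQ N k p * (pvQ N k p - 1) / 2)

theorem pvDvd_iff_mod (N k p : Nat) (hp : p < N) (hpk : p ≤ k) : N ∣ (k - p) ↔ k % N = p := by
  constructor
  · rintro ⟨m, hm⟩
    have hk : k = p + N * m := by omega
    rw [hk, Nat.add_mul_mod_self_left]
    exact Nat.mod_eq_of_lt hp
  · intro hm
    have := Nat.div_add_mod k N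
    exact ⟨k / N, by omega⟩

theorem pvQ_step (N k p : Nat) (_hN : 0 < N) (hp : p < N) :
    pvQ N (k + 1) p = pvQ N k p + (if k % N = p then 1 else 0) := by
  unfold pvQ
  rcases Nat.lt_trichotomy p k with hpk | rfl | hpk
  · have hd := pvDvd_iff_mod N k p hp (by omega)
    have hsd : (k - p - 1 + 1) / N = (k - p - 1) / N + if N ∣ k - p - 1 + 1 then 1 else 0 := Nat.succ_div
    have he : k - p - 1 + 1 = k - p := by omega
    rw [he] at hsd
    rw [if_pos (by omega : p < k + 1), if_pos hpk]
    have he2 : k + 1 - p - 1 = k - p := by omega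
    rw [he2, hsd]
    by_cases hc : k % N = p
    · rw [if_pos hc, if_pos (hd.mpr hc)]
    · rw [if_neg hc, if_neg (fun hx => hc (hd.mp hx))]
  · rw [if_pos (by omega : p < p + 1), if_neg (by omega : ¬ p < p), if_pos (Nat.mod_eq_of_lt hp)]
    have he : p + 1 - p - 1 = 0 := by omega
    rw [he, Nat.zero_div]
  · rw [if_neg (by omega : ¬ p < k + 1), if_neg (by omega : ¬ p < k),
      if_neg (by have := Nat.mod_le k N; omega : ¬ k % N = p)]

theorem pvQ_mod (N k p : Nat) (hN : 0 < N) (hp : p < N) (hc : k % N = p) : pvQ N k p = k / N := by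
  unfold pvQ
  rcases Nat.lt_trichotomy p k with hpk | rfl | hpk
  · rw [if_pos hpk]
    have hm : k - p = N * (k / N) := by have := Nat.div_add_mod k N; omega
    have hkd : 1 ≤ k / N := by
      rcases Nat.eq_zero_or_pos (k / N) with h0 | h0
      · rw [h0, Nat.mul_zero] at hm; omega
      · exact h0
    have h6 : k - p - 1 = (N - 1) + N * (k / N - 1) := by
      have h5 : k / N = (k / N - 1) + 1 := by omega
      have h7 : N * (k / N) = N * (k / N - 1) + N := by
        conv_lhs => rw [h5]
        rw [Nat.mul_succ]
      omega
    rw [h6, Nat.add_mul_div_left _ _ hN, Nat.div_eq_of_lt (by omega : N - 1 < N)]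
    omega
  · rw [if_neg (by omega : ¬ p < p)]
    rw [Nat.div_eq_of_lt hp]
  · have := Nat.mod_le k N
    omega

theorem pvCf_step (N k p : Nat) (hN : 0 < N) (hp : p < N) :
    pvCf N (k + 1) p = pvCf N k p + (if k % N = p then k + 1 else 0) := by
  have hq := pvQ_step N k p hN hp
  unfold pvCf
  rw [hq]
  by_cases hc : k % N = p
  · rw [if_pos hc, if_pos hc]
    have hkey : p + 1 + N * pvQ N k p = k + 1 := by
      rw [pvQ_mod N k p hN hp hc]
      have := Nat.div_add_mod k N
      omega
    set q := pvQ N k p with hqdef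
    have htri : (q + 1) * q / 2 = q * (q - 1) / 2 + q := by
      cases q with
      | zero => simp
      | succ m =>
        have h2 : (m + 1 + 1) * (m + 1) = (m + 1) * m + 2 * (m + 1) := by ring
        have h3 : m + 1 - 1 = m := by omega
        rw [h3]
        omega
    have e1 : (q + 1) * (p + 1) = q * (p + 1) + (p + 1) := by ring
    have e2 : N * ((q + 1) * (q + 1 - 1) / 2) = N * (q * (q - 1) / 2) + N * q := by
      rw [Nat.add_sub_cancel, htri, Nat.mul_add]
    omega
  · rw [if_neg hc, if_neg hc]
    simp

theorem pvApply_append (n : Int) (ans : List Int) (j : Int) (gs1 gs2 : List Nat) :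
    pvApply n ans j (gs1 ++ gs2)
      = pvApply n (pvApply n ans j gs1) (gs1.foldl (fun j _ => if j + 1 = n then 0 else j + 1) j) gs2 := by
  induction gs1 generalizing ans j with
  | nil => simp [pvApply]
  | cons g gs ih => simp only [List.cons_append, pvApply, List.foldl_cons]; exact ih _ _

theorem pvEndJ (N : Nat) (hN : 0 < N) (gs : List Nat) (j : Nat) (hj : j < N) :
    gs.foldl (fun (j : Int) _ => if j + 1 = (N : Int) then 0 else j + 1) (j : Int)
      = (((j + gs.length) % N : Nat) : Int) := by
  induction gs generalizing j with
  | nil => simp [Nat.mod_eq_of_lt hj]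
  | cons g gs ih =>
    simp only [List.foldl_cons, List.length_cons]
    by_cases h : j + 1 = N
    · have hcast : ((j : Int) + 1 = (N : Int)) := by exact_mod_cast h
      rw [if_pos hcast]
      have h2 := ih 0 hN
      have h3 : ((0 : Nat) : Int) = 0 := rfl
      rw [h3] at h2
      rw [h2]
      congr 1
      have h4 : j + (gs.length + 1) = N + gs.length := by omega
      rw [h4, Nat.add_mod_left, Nat.zero_add]
    · rw [if_neg (by intro hc; apply h; exact_mod_cast hc)]
      have hcast : ((j : Int) + 1) = ((j + 1 : Nat) : Int) := by push_cast; ring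
      rw [hcast, ih (j + 1) (by omega)]
      have h4 : j + 1 + gs.length = j + (gs.length + 1) := by omega
      rw [h4]

theorem pvF (N : Nat) (hN : 0 < N) (k : Nat) :
    pvApply (N : Int) ((List.range N).map (fun _ => (0 : Int))) 0 ((List.range k).map (fun s => s + 1))
      = (List.range N).map (fun p => (pvCf N k p : Int)) := by
  induction k with
  | zero =>
    simp only [List.range_zero, List.map_nil, pvApply]
    apply List.map_congr_left
    intro p _
    simp [pvCf, pvQ]
  | succ k ih =>
    rw [List.range_succ, List.map_append, pvApply_append, ih]
    have hEnd := pvEndJ N hN ((List.range k).map (fun s => s + 1)) 0 hN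
    simp only [Nat.cast_zero, List.length_map, List.length_range, Nat.zero_add] at hEnd
    rw [hEnd]
    simp only [List.map_cons, List.map_nil]
    -- now: pvApply N (map cf) ↑(k % N) [k+1] = map cf'
    rw [pvApply]
    simp only [pvApply]
    have hlt : k % N < N := Nat.mod_lt k hN
    have hget : PySem.List.pyGetD ((List.range N).map (fun p => (pvCf N k p : Int))) ((k % N : Nat) : Int) 0
        = (pvCf N k (k % N) : Int) := by
      rw [PySem.List.pyGetD_natCast]
      rw [List.getD_eq_getElem?_getD, List.getElem?_map, List.getElem?_range hlt]
      rfl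
    rw [hget, PySem.List.pySetD_natCast]
    apply List.ext_getElem
    · simp
    · intro i hi1 hi2
      simp only [List.getElem_set, List.getElem_map, List.getElem_range]
      have hiN : i < N := by simpa using hi2
      rw [pvCf_step N k i hN hiN]
      by_cases hie : k % N = i
      · rw [if_pos (by omega : k % N = i), if_pos hie]
        push_cast [hie]
        ring
      · rw [if_neg (by omega : ¬ k % N = i), if_neg hie]
        simp

-- final assembly ------------------------------------------------------------------

-- B's per-person formula equals the cast of the Nat closed form
theorem pvQcast (N kN p : Nat) :
    (if (p : Int) < (kN : Int) then PySem.Int.floordiv ((kN : Int) - (p : Int) - 1) (N : Int) + 1 else 0)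
      = ((pvQ N kN p : Nat) : Int) := by
  unfold pvQ
  by_cases hpk : p < kN
  · rw [if_pos (by exact_mod_cast hpk), if_pos hpk]
    have h1 : ((kN : Int) - (p : Int) - 1) = ((kN - p - 1 : Nat) : Int) := by omega
    rw [h1, show ((N : Int)) = ((N : Nat) : Int) from rfl, PySem.Int.floordiv_natCast]
    push_cast
    ring
  · rw [if_neg (by exact_mod_cast hpk), if_neg hpk]
    simp

theorem pvAltCell (N kN : Nat) (p : Nat) :
    (let q : Int := if (p : Int) < (kN : Int) then PySem.Int.floordiv ((kN : Int) - (p : Int) - 1) (N : Int) + 1 else 0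
     q * ((p : Int) + 1) + (N : Int) * (PySem.Int.floordiv (q * (q - 1)) 2))
      = ((pvCf N kN p : Nat) : Int) := by
  simp only [pvQcast N kN p]
  set qn := pvQ N kN p with hqn
  have h4 : ((qn : Int)) * ((qn : Int) - 1) = ((qn * (qn - 1) : Nat) : Int) := by
    cases qn with
    | zero => simp
    | succ m => push_cast [Nat.succ_sub_one]; ring
  rw [h4, show ((2 : Int)) = ((2 : Nat) : Int) from rfl, PySem.Int.floordiv_natCast]
  unfold pvCf
  push_cast
  ring

theorem distributeCandies_eq_alt (candies num_people : Int)
    (h : Pre_distributeCandies candies num_people) :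
    distributeCandies candies num_people = distributeCandies_alt candies num_people := by
  by_cases hc : candies ≤ 0
  · unfold distributeCandies distributeCandies_alt
    rw [if_pos hc]
    simp only [pvALoop]
    rw [if_neg (by omega : ¬ (0 : Int) < candies)]
  · have hcpos : 0 < candies := by omega
    have hn : 0 < num_people := by rcases h with h | h; omega; exact h
    obtain ⟨C, hCc⟩ : ∃ C : Nat, candies = (C : Int) := ⟨candies.toNat, by omega⟩
    obtain ⟨N, hNc⟩ : ∃ N : Nat, num_people = (N : Int) := ⟨num_people.toNat, by omega⟩
    subst hCc hNc
    have hC0 : 0 < C := by exact_mod_cast hcpos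
    have hN0 : 0 < N := by exact_mod_cast hn
    set kN := pvK C 0 with hkdef
    have hbr := pvK_bracket C 0
    rw [pvSumTo_zero_left, pvSumTo_zero_left] at hbr
    have hkC : pvTri kN ≤ C := hbr.1
    -- the list of zeros, as a range-map
    have hzeros : (PySem.List.pyRange 0 (N : Int) 1).map (fun _ => (0 : Int))
        = (List.range N).map (fun _ => (0 : Int)) := by
      rw [PySem.List.pyRange_zero_natCast, List.map_map]
      rfl
    -- A reduces to pvApply of the give sequence
    have hA : distributeCandies (C : Int) (N : Int)
        = pvApply (N : Int) ((List.range N).map (fun _ => (0 : Int))) 0 (pvGives C 0) := by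
      simp only [distributeCandies]
      rw [hzeros, Int.toNat_natCast]
      have hsim := pvALoop_sim C C 0 (C + 1) ((List.range N).map (fun _ => (0 : Int))) 0 (N : Int)
        (by simp [pvTri]) (by simpa [pvTri] using hC0) (by simp [pvTri]; omega) le_rfl
      have e1 : ((0 : Nat) : Int) + 1 = (1 : Int) := by norm_num
      have e2 : ((pvTri (0 + 1) : Nat) : Int) - 1 = (0 : Int) := by simp [pvTri]
      rw [e1, e2] at hsim
      exact hsim
    -- B's binary search finds kN
    have hk : pvBSearch (C + 1) (C : Int) 0 (C : Int) = (kN : Int) := by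
      have h := pvBSearch_eq (C : Int) hcpos
      rwa [Int.toNat_natCast] at h
    -- B's remainder
    have hrem : (C : Int) - PySem.Int.floordiv ((kN : Int) * ((kN : Int) + 1)) 2
        = ((C - pvTri kN : Nat) : Int) := by
      rw [pvTriInt kN]
      omega
    -- B's comprehension is the closed-form list
    have hansB : (PySem.List.pyRange 0 (N : Int) 1).map (fun p =>
          (fun (q : Int) => q * (p + 1) + (N : Int) * (PySem.Int.floordiv (q * (q - 1)) 2))
            (if p < (kN : Int) then PySem.Int.floordiv ((kN : Int) - p - 1) (N : Int) + 1 else 0))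
        = (List.range N).map (fun p => ((pvCf N kN p : Nat) : Int)) := by
      rw [PySem.List.pyRange_zero_natCast, List.map_map]
      apply List.map_congr_left
      intro p _
      exact pvAltCell N kN p
    -- index of the remainder
    have hidx : PySem.Int.mod (kN : Int) (N : Int) = ((kN % N : Nat) : Int) :=
      PySem.Int.mod_natCast kN N
    -- assemble A
    have hgv := pvGives_eq C 0 hC0
    rw [pvSumTo_zero_left, ← hkdef] at hgv
    have hmap : (List.range kN).map (fun s => 0 + 1 + s) = (List.range kN).map (fun s => s + 1) :=
      List.map_congr_left (by intro s _; omega)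
    rw [hmap] at hgv
    have hendj : (((List.range kN).map (fun s => s + 1)).foldl
          (fun (j : Int) _ => if j + 1 = (N : Int) then 0 else j + 1) 0)
        = ((kN % N : Nat) : Int) := by
      have := pvEndJ N hN0 ((List.range kN).map (fun s => s + 1)) 0 hN0
      simpa using this
    have hLB := pvF N hN0 kN
    rw [hA, hgv, pvApply_append, hLB, hendj]
    -- assemble B
    simp only [distributeCandies_alt]
    rw [if_neg hc, Int.toNat_natCast, hk, hrem, hansB, hidx]
    by_cases hz : C = pvTri kN
    · rw [if_pos hz]
      simp only [pvApply]
      have hzz : ((C - pvTri kN : Nat) : Int) = 0 := by omega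
      rw [hzz, add_zero]
      have hlt : kN % N < N := Nat.mod_lt kN hN0
      rw [PySem.List.pySetD_natCast, PySem.List.pyGetD_natCast]
      rw [List.getD_eq_getElem ((List.range N).map (fun p => ((pvCf N kN p : Nat) : Int))) 0
        (by simpa using hlt)]
      rw [List.set_getElem_self]
    · rw [if_neg hz]
      simp only [pvApply]

-- ===== VERDICT (by name: the statement is the Claim_ definition above) =====
theorem distributeCandies_spec : Claim_equal_distributeCandies := by
  intro candies num_people _ hpre
  exact distributeCandies_eq_alt candies num_people hpre
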